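-- pv_equiv track=rewrite | github.com/sudeep-reddy-07/Grl_Tasks_STrainee | Task_problems_GRL/word_counter/wors_counter.py | count_word_occurrences
-- ===== SOURCE A (Python) =====
-- def count_word_occurrences(n, words):
--     """
--     Counts the occurrences of each word and maintains the order of appearance.
--
--     Parameters:
--     n (int): The number of words.
--     words (list): A list of words.
--
--     Returns:
--     tuple: (number of distinct words, list of occurrences)
--     """
--     word_count = {}
--     word_order = []
--
--     # Iterate through words and count occurrences
--     for word in words:
--         if word not in word_count:
--             word_order.append(word)
--             word_count[word] = 1
--         else:
--             word_count[word] += 1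
--
--     distinct_count = len(word_order)
--     occurrences = [str(word_count[word]) for word in word_order]
--
--     return distinct_count, occurrences
-- ===== SOURCE B (Python) =====
-- def count_word_occurrences(n, words):
--     """Head-and-filter recursion flattened to a loop: the first remaining word is
--     the next distinct word; its count is how much the remainder shrinks when all
--     its copies are filtered out. No dict or membership structure; ignores n like A."""
--     occurrences = []
--     rest = words
--     while rest:
--         w = rest[0]
--         keep = [x for x in rest if x != w]
--         occurrences.append(str(len(rest) - len(keep)))
--         rest = keep
--     return len(occurrences), occurrences
-- ===== Notes on version B (the rewrite author's own statement) =====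
-- stated objective: alternative
-- what changed: Replaces the single-pass dict accumulation (counter map plus first-appearance order list) with a quicksort-partition-style head-and-filter loop: the first remaining word is the next distinct word, its count is the length drop when all its copies are filtered out, and the loop recurses on the filtered remainder; no dictionary or membership structure is used.
import Mathlib
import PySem

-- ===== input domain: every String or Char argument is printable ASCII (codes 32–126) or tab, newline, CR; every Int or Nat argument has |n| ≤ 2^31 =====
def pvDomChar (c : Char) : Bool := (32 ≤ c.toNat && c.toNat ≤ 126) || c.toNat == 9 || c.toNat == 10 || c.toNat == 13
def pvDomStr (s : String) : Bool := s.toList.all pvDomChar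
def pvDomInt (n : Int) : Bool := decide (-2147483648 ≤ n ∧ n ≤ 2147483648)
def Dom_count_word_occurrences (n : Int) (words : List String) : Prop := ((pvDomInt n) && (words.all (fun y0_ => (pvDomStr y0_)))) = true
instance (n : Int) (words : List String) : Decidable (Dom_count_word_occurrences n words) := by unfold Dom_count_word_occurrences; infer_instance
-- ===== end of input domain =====

-- B replaces A's single-pass dict accumulation with a head-and-filter partition loop (alternative decomposition; return value only, no mutation).

-- ===== PORT A =====
-- loop body of A: if word not in word_count: append & set 1, else increment
def cwoLoopA (st : PySem.Dict String Int × List String) (word : String) :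
    PySem.Dict String Int × List String :=
  if st.1.contains word = false then
    (st.1.insert word 1, st.2 ++ [word])
  else
    -- word_count[word] += 1; getD is exact here: the key is present on this branch
    (st.1.insert word (st.1.getD word 0 + 1), st.2)

def count_word_occurrences (n : Int) (words : List String) : Int × List String :=
  let st := words.foldl cwoLoopA (PySem.Dict.empty, [])
  let distinct_count : Int := st.2.length
  -- word_count[word]; getD is exact: every word of word_order is a key of word_count
  let occurrences := st.2.map (fun word => PySem.Int.toStr (st.1.getD word 0))
  (distinct_count, occurrences)

-- ===== PORT B =====
-- B's while-loop: head word w of the remainder, keep = remainder without w's,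
-- append str(len(rest)-len(keep)), continue on keep
def cwoB : List String → List String
  | [] => []
  | w :: t =>
    let keep := (w :: t).filter (fun x => !decide (x = w))
    PySem.Int.toStr (((w :: t).length : Int) - (keep.length : Int)) :: cwoB keep
termination_by rest => rest.length
decreasing_by
  simp only [List.filter_cons]
  simp
  exact List.length_filter_le _ _

def count_word_occurrences_alt (n : Int) (words : List String) : Int × List String :=
  let occurrences := cwoB words
  ((occurrences.length : Int), occurrences)

-- ===== PRECONDITION & SPEC =====
def Spec_count_word_occurrences (n : Int) (words : List String) (out : Int × List String) : Prop := out = count_word_occurrences_alt n words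
instance (n : Int) (words : List String) (out : Int × List String) : Decidable (Spec_count_word_occurrences n words out) := by unfold Spec_count_word_occurrences; infer_instance

-- ===== CLAIM (what is proved, stated in full; the proofs are below) =====
def Claim_equal_count_word_occurrences : Prop := ∀ (n : Int) (words : List String), Dom_count_word_occurrences n words → Spec_count_word_occurrences n words (count_word_occurrences n words)

-- ===== LEMMAS AND PROOFS =====

-- folding Set.add skips every occurrence of a word already in the accumulator
theorem cwo_foldl_add_filter (w : String) :
    ∀ (t acc : List String), w ∈ acc →
      t.foldl PySem.Set.add acc = (t.filter (fun x => !decide (x = w))).foldl PySem.Set.add acc := by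
  intro t
  induction t with
  | nil => intro acc _; rfl
  | cons x t ih =>
    intro acc hacc
    by_cases hx : x = w
    · subst hx
      have : PySem.Set.add acc x = acc := by
        simp [PySem.Set.add, PySem.Set.contains, hacc]
      simp [List.filter_cons, this, ih acc hacc]
    · have hmem : w ∈ PySem.Set.add acc x := by
        simp [PySem.Set.add]; split_ifs <;> simp [hacc]
      simp [List.filter_cons, hx, ih _ hmem]

-- a word absent from the list can be pulled out of the accumulator
theorem cwo_foldl_add_pull (w : String) :
    ∀ (l s : List String), w ∉ l →
      l.foldl PySem.Set.add ([w] ++ s) = w :: l.foldl PySem.Set.add s := by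
  intro l
  induction l with
  | nil => intro s _; rfl
  | cons x l ih =>
    intro s hl
    have hxw : x ≠ w := fun h => hl (by simp [h])
    have hstep : PySem.Set.add ([w] ++ s) x = [w] ++ PySem.Set.add s x := by
      simp [PySem.Set.add, PySem.Set.contains, hxw]
      split_ifs <;> simp
    simp only [List.foldl_cons, hstep]
    exact ih _ (fun h => hl (by simp [h]))

-- dedup of a cons: head, then dedup of the tail with all copies of the head removed
theorem cwo_dedup_cons (w : String) (t : List String) :
    PySem.List.dedup (w :: t) =
      w :: PySem.List.dedup (t.filter (fun x => !decide (x = w))) := by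
  have h0 : PySem.List.dedup (w :: t) = t.foldl PySem.Set.add [w] := by
    simp [PySem.List.dedup_eq_ofList, PySem.Set.ofList_eq_foldl, PySem.Set.add,
      PySem.Set.contains]
  rw [h0, cwo_foldl_add_filter w t [w] (by simp)]
  have hnot : w ∉ t.filter (fun x => !decide (x = w)) := by
    simp [List.mem_filter]
  have := cwo_foldl_add_pull w (t.filter (fun x => !decide (x = w))) [] hnot
  simpa [PySem.List.dedup_eq_ofList, PySem.Set.ofList_eq_foldl] using this

-- counting arithmetic: removing all w's drops the length by exactly count w
theorem cwo_count_length (w : String) (l : List String) :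
    (l.count w : Int) = (l.length : Int) - ((l.filter (fun x => !decide (x = w))).length : Int) := by
  induction l with
  | nil => simp
  | cons x l ih =>
    by_cases hx : x = w
    · subst hx; simp [List.count_cons, List.filter_cons, ih]; omega
    · simp [List.count_cons, hx, List.filter_cons, Ne.symm hx, ih]

-- filtering out w's does not change other words' counts
theorem cwo_count_filter (w u : String) (l : List String) (hu : u ≠ w) :
    (l.filter (fun x => !decide (x = w))).count u = l.count u := by
  induction l with
  | nil => rfl
  | cons x l ih =>
    rw [List.filter_cons]
    by_cases hx : x = w
    · subst hx; simp [List.count_cons, Ne.symm hu, ih]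
    · simp [hx, List.count_cons, ih]

-- characterisation of B's loop: occurrences = counts over the ordered dedup
theorem cwoB_eq_aux : ∀ (fuel : Nat) (l : List String), l.length ≤ fuel →
    cwoB l = (PySem.List.dedup l).map (fun w => PySem.Int.toStr (l.count w : Int)) := by
  intro fuel
  induction fuel with
  | zero =>
    intro l hl
    have : l = [] := List.eq_nil_of_length_eq_zero (Nat.le_zero.mp hl)
    subst this
    rw [cwoB]
    simp
  | succ m ih =>
    intro l hl
    match l with
    | [] => rw [cwoB]; simp
    | w :: t =>
      rw [cwoB, cwo_dedup_cons]
      have hfw : (w :: t).filter (fun x => !decide (x = w)) = t.filter (fun x => !decide (x = w)) := by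
        simp [List.filter_cons]
      have hle : (t.filter (fun x => !decide (x = w))).length ≤ m := by
        have := List.length_filter_le (fun x => !decide (x = w)) t
        simp at hl
        omega
      rw [hfw, ih _ hle]
      simp only [List.map_cons, List.map_map, List.cons.injEq]
      constructor
      · congr 1
        rw [cwo_count_length w (w :: t)]
        simp [hfw]
      · apply List.map_congr_left
        intro u hu
        have huw : u ≠ w := by
          have hmem : u ∈ List.filter (fun x => !decide (x = w)) t := by
            simpa [PySem.List.dedup_eq_ofList, PySem.Set.mem_ofList] using hu
          simp [List.mem_filter] at hmem
          exact hmem.2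
        simp [cwo_count_filter w u t huw, List.count_cons, Ne.symm huw]

theorem cwoB_eq (l : List String) :
    cwoB l = (PySem.List.dedup l).map (fun w => PySem.Int.toStr (l.count w : Int)) :=
  cwoB_eq_aux l.length l le_rfl

-- loop invariant for A's fold: the order list is the dedup of the processed prefix,
-- the dict holds the counts of the processed prefix
theorem cwo_loop_inv (ys : List String) :
    ∀ (xs : List String) (d : PySem.Dict String Int) (order : List String),
    order = PySem.List.dedup xs →
    (∀ w, d.getD w 0 = (xs.count w : Int)) →
    (∀ w, d.contains w = decide (w ∈ xs)) →
    (ys.foldl cwoLoopA (d, order)).2 = PySem.List.dedup (xs ++ ys) ∧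
      ∀ w, (ys.foldl cwoLoopA (d, order)).1.getD w 0 = ((xs ++ ys).count w : Int) := by
  induction ys with
  | nil => intro xs d order h1 h2 h3; simpa using ⟨h1, h2⟩
  | cons a ys ih =>
    intro xs d order h1 h2 h3
    have step : cwoLoopA (d, order) a =
        ((d.insert a (d.getD a 0 + 1), order).1, if a ∈ xs then order else order ++ [a]) := by
      by_cases hmem : a ∈ xs
      · have hc : d.contains a = true := by rw [h3]; simp [hmem]
        simp [cwoLoopA, hc, hmem]
      · have hc : d.contains a = false := by rw [h3]; simp [hmem]
        have hz : d.getD a 0 = 0 := by rw [h2]; simp [List.count_eq_zero_of_not_mem hmem]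
        simp [cwoLoopA, hc, hmem, hz]
    have h1' : (if a ∈ xs then order else order ++ [a]) = PySem.List.dedup (xs ++ [a]) := by
      rw [PySem.List.dedup_eq_ofList, PySem.Set.ofList_eq_foldl, List.foldl_append]
      rw [← PySem.Set.ofList_eq_foldl, ← PySem.List.dedup_eq_ofList, ← h1]
      simp [PySem.Set.add, PySem.Set.contains, h1, PySem.List.mem_dedup]
    have h2' : ∀ w, (d.insert a (d.getD a 0 + 1)).getD w 0 = ((xs ++ [a]).count w : Int) := by
      intro w
      rw [PySem.Dict.getD_insert]
      by_cases hw : w = a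
      · subst hw; simp [h2, List.count_append]
      · simp [hw, h2, List.count_append, Ne.symm hw]
    have h3' : ∀ w, (d.insert a (d.getD a 0 + 1)).contains w = decide (w ∈ xs ++ [a]) := by
      intro w
      rw [PySem.Dict.contains_insert, h3]
      by_cases hw : w = a <;> simp [hw]
    have := ih (xs ++ [a]) (d.insert a (d.getD a 0 + 1)) (if a ∈ xs then order else order ++ [a]) h1' h2' h3'
    simpa [step, List.append_assoc] using this

-- ===== VERDICT (by name: the statement is the Claim_ definition above) =====
theorem count_word_occurrences_spec : Claim_equal_count_word_occurrences := by
  intro n words _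
  unfold Spec_count_word_occurrences count_word_occurrences count_word_occurrences_alt
  obtain ⟨horder, hcount⟩ := cwo_loop_inv words [] PySem.Dict.empty [] (by rfl)
    (fun w => by simp [PySem.Dict.getD_empty]) (fun w => by simp [PySem.Dict.contains_empty])
  simp only [List.nil_append] at horder hcount
  simp [horder, hcount, cwoB_eq]
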